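-- pv_equiv track=rewrite | github.com/BarneyEvans/REFINED_PART3 | Boundary_Deduction.py | validate_overlap_conditions
-- ===== SOURCE A (Python) =====
-- def validate_overlap_conditions(all_x_position_results, valid_box):
--     """
--     Validates the overlap conditions for all query points based on the valid_box criteria.
--
--     Args:
--     all_x_position_results (list of lists): Nested list of results, each sublist corresponding to a query point,
--                                             containing tuples of (strip_id, boolean status, query_point).
--     valid_box (str): Specifies the tolerance ("zero", "one", "two").
--
--     Returns:
--     list of lists: Each sublist contains strip identifiers where the query point meets the overlap conditions.
--     """
--     all_valid_strips = []
--     tolerance_map = {"zero": 0, "one": 1, "two": 2}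
--     allowed_failures = tolerance_map.get(valid_box, 0)
--
--     for x_position_results in all_x_position_results:
--         valid_strips = []
--         strip_groups = {}
--
--         for strip_id, status, point in x_position_results:
--             if strip_id not in strip_groups:
--                 strip_groups[strip_id] = []
--             strip_groups[strip_id].append(status)
--
--         for strip_id, statuses in strip_groups.items():
--             if statuses.count(False) <= allowed_failures:
--                 valid_strips.append(strip_id)
--
--         all_valid_strips.append(valid_strips)
--
--     return all_valid_strips
-- ===== SOURCE B (Python) =====
-- def validate_overlap_conditions(all_x_position_results, valid_box):
--     """No grouping structure at all: record strip ids in first-appearance order,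
--     then re-scan the sublist per strip id to count its failures."""
--     allowed_failures = {"zero": 0, "one": 1, "two": 2}.get(valid_box, 0)
--     out = []
--     for results in all_x_position_results:
--         order = []
--         for sid, _, _ in results:
--             if sid not in order:
--                 order.append(sid)
--         out.append([sid for sid in order
--                     if sum(1 for s, ok, _ in results if s == sid and not ok) <= allowed_failures])
--     return out
-- ===== Notes on version B (the rewrite author's own statement) =====
-- stated objective: alternative
-- what changed: B drops A's grouping dict entirely: it collects strip ids in first-appearance order into a plain list and, for each id, re-scans the whole sublist counting that id's failures (a nested-scan algorithm instead of hash grouping); trades O(n) grouping for O(n*k) rescans.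
import Mathlib
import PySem

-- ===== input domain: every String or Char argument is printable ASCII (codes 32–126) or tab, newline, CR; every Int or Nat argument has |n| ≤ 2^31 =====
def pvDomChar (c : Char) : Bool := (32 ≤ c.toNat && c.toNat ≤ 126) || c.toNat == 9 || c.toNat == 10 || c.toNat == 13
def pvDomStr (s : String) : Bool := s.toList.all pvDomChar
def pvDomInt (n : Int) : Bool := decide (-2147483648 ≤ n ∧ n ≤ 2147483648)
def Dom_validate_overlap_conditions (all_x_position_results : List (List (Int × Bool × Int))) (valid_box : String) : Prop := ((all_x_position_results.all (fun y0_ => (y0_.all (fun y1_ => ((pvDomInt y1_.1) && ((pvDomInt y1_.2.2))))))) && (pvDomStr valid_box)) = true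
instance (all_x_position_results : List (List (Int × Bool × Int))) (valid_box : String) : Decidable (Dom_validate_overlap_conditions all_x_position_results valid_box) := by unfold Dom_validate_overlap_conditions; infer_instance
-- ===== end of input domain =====

-- B drops A's grouping dict: strip ids are collected in first-appearance order into a plain
-- list and each id's failures are counted by re-scanning the sublist (objective: alternative,
-- no speed claim); same return value.
-- ===== PORT A =====
def validate_overlap_conditions (all_x_position_results : List (List (Int × Bool × Int))) (valid_box : String) : List (List Int) :=
  let tolerance_map : PySem.Dict String Int :=
    ((PySem.Dict.empty.insert "zero" 0).insert "one" 1).insert "two" 2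
  let allowed_failures := tolerance_map.getD valid_box 0
  all_x_position_results.foldl (fun all_valid_strips x_position_results =>
    let strip_groups : PySem.Dict Int (List Bool) :=
      x_position_results.foldl (fun d p =>
        let d := if d.contains p.1 then d else d.insert p.1 []
        d.modify p.1 [] (fun l => l ++ [p.2.1])) PySem.Dict.empty
    let valid_strips := strip_groups.items.foldl (fun vs q =>
      if (q.2.count false : Int) ≤ allowed_failures then vs ++ [q.1] else vs) []
    all_valid_strips ++ [valid_strips]) []

-- ===== PORT B =====
def validate_overlap_conditions_alt (all_x_position_results : List (List (Int × Bool × Int))) (valid_box : String) : List (List Int) :=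
  let allowed_failures :=
    (((PySem.Dict.empty.insert "zero" (0 : Int)).insert "one" 1).insert "two" 2).getD valid_box 0
  all_x_position_results.map (fun results =>
    let order : List Int :=
      results.foldl (fun s p => if s.contains p.1 then s else s ++ [p.1]) []
    order.filter (fun sid =>
      ((results.filter (fun p => p.1 == sid && p.2.1 == false)).length : Int) ≤ allowed_failures))

-- ===== PRECONDITION & SPEC =====
def Spec_validate_overlap_conditions (all_x_position_results : List (List (Int × Bool × Int))) (valid_box : String) (out : List (List Int)) : Prop := out = validate_overlap_conditions_alt all_x_position_results valid_box
instance (all_x_position_results : List (List (Int × Bool × Int))) (valid_box : String) (out : List (List Int)) : Decidable (Spec_validate_overlap_conditions all_x_position_results valid_box out) := by unfold Spec_validate_overlap_conditions; infer_instance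

-- ===== CLAIM (what is proved, stated in full; the proofs are below) =====
def Claim_equal_validate_overlap_conditions : Prop := ∀ (all_x_position_results : List (List (Int × Bool × Int))) (valid_box : String), Dom_validate_overlap_conditions all_x_position_results valid_box → Spec_validate_overlap_conditions all_x_position_results valid_box (validate_overlap_conditions all_x_position_results valid_box)

-- ===== LEMMAS AND PROOFS =====

-- A's per-tuple step: ensure the key is present, then append the status to its group.
def pvStepA (d : PySem.Dict Int (List Bool)) (p : Int × Bool × Int) : PySem.Dict Int (List Bool) :=
  (if d.contains p.1 then d else d.insert p.1 []).modify p.1 [] (fun l => l ++ [p.2.1])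

-- B's per-tuple step: record an unseen strip id.
def pvSeen (s : List Int) (p : Int × Bool × Int) : List Int :=
  if s.contains p.1 then s else s ++ [p.1]

def pvAllowed (valid_box : String) : Int :=
  (((PySem.Dict.empty.insert "zero" (0 : Int)).insert "one" 1).insert "two" 2).getD valid_box 0

lemma pvStepA_getD (d : PySem.Dict Int (List Bool)) (p : Int × Bool × Int) (k : Int) :
    (pvStepA d p).getD k [] = if k = p.1 then d.getD p.1 [] ++ [p.2.1] else d.getD k [] := by
  unfold pvStepA
  by_cases h : d.contains p.1
  · simp [h, PySem.Dict.getD_modify]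
  · have h' : d.contains p.1 = false := by simpa using h
    by_cases hk : k = p.1
    · subst hk
      simp [h', PySem.Dict.getD_of_not_contains d _ h']
    · simp [h', PySem.Dict.getD_modify, PySem.Dict.getD_insert, hk]

lemma pvStepA_keys (d : PySem.Dict Int (List Bool)) (p : Int × Bool × Int) :
    (pvStepA d p).keys = if d.contains p.1 then d.keys else d.keys ++ [p.1] := by
  unfold pvStepA
  by_cases h : d.contains p.1
  · simp [h, PySem.Dict.keys_modify, PySem.Dict.keys_insert_of_contains d _ h]
  · have h' : d.contains p.1 = false := by simpa using h
    simp only [h', Bool.false_eq_true, if_false, PySem.Dict.keys_modify,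
      PySem.Dict.insert_insert_self]
    exact PySem.Dict.keys_insert_of_not_contains d _ h'

-- A's dict keys are exactly B's first-appearance list.
lemma pvKeys_eq_seen (xs : List (Int × Bool × Int)) :
    ∀ (d : PySem.Dict Int (List Bool)) (s : List Int), d.keys = s →
      (xs.foldl pvStepA d).keys = xs.foldl pvSeen s := by
  induction xs with
  | nil => intro d s h; simpa using h
  | cons p tl ih =>
    intro d s h
    simp only [List.foldl_cons]
    apply ih
    rw [pvStepA_keys]
    have : d.contains p.1 = s.contains p.1 := by
      simp [PySem.Dict.contains_eq_decide_mem_keys, h]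
    unfold pvSeen
    rw [this, h]

lemma pvSeen_nodup (xs : List (Int × Bool × Int)) :
    ∀ s : List Int, s.Nodup → (xs.foldl pvSeen s).Nodup := by
  induction xs with
  | nil => intro s h; simpa using h
  | cons p tl ih =>
    intro s h
    simp only [List.foldl_cons]
    apply ih
    unfold pvSeen
    by_cases hc : p.1 ∈ s
    · simp [hc, h]
    · simp [hc, List.nodup_append, h]
      exact fun a ha hb => hc (hb ▸ ha)

-- A's group for key k is the statuses of k's tuples, in order.
lemma pvGroup_eq_filter (xs : List (Int × Bool × Int)) :
    ∀ (d : PySem.Dict Int (List Bool)) (k : Int),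
      (xs.foldl pvStepA d).getD k []
        = d.getD k [] ++ (xs.filter (fun p => p.1 == k)).map (fun p => p.2.1) := by
  induction xs with
  | nil => intro d k; simp
  | cons p tl ih =>
    intro d k
    simp only [List.foldl_cons]
    rw [ih, pvStepA_getD]
    by_cases hk : k = p.1
    · subst hk
      simp
    · have : (p.1 == k) = false := by simpa using Ne.symm hk
      simp [hk, this]

-- count(False) of the statuses of k equals the number of failing tuples of k.
lemma pvCount_eq_length (xs : List (Int × Bool × Int)) (k : Int) :
    ((xs.filter (fun p => p.1 == k)).map (fun p => p.2.1)).count false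
      = (xs.filter (fun p => p.1 == k && p.2.1 == false)).length := by
  induction xs with
  | nil => rfl
  | cons p tl ih =>
    by_cases hk : (p.1 == k) = true
    · by_cases hs : p.2.1 = false
      · simp [hk, hs, ih]
      · have hs' : p.2.1 = true := by simpa using hs
        simp [hk, hs', ih]
    · simp [hk, ih]

-- Equality of the two per-sublist computations.
lemma pvPerSublist (x : List (Int × Bool × Int)) (allowed : Int) :
    ((x.foldl pvStepA PySem.Dict.empty).items.foldl
        (fun vs q => if (q.2.count false : Int) ≤ allowed then vs ++ [q.1] else vs) []) =
    ((x.foldl pvSeen []).filter (fun sid =>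
        ((x.filter (fun p => p.1 == sid && p.2.1 == false)).length : Int) ≤ allowed)) := by
  have hkeys : (x.foldl pvStepA PySem.Dict.empty).keys = x.foldl pvSeen [] :=
    pvKeys_eq_seen x PySem.Dict.empty [] (by simp [PySem.Dict.keys_empty])
  have hnd : (x.foldl pvStepA PySem.Dict.empty).keys.Nodup := by
    rw [hkeys]; exact pvSeen_nodup x [] List.nodup_nil
  rw [PySem.List.foldl_append_ite (fun q : Int × List Bool => ((q.2.count false : Int) ≤ allowed))
      (fun q => q.1)]
  rw [PySem.Dict.items_eq_map_keys _ hnd ([] : List Bool)]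
  simp only [List.nil_append, List.filter_map, List.map_map, Function.comp_def]
  rw [hkeys]
  rw [List.map_id']
  refine List.filter_congr ?_
  intro k _
  rw [pvGroup_eq_filter x PySem.Dict.empty k]
  simp [PySem.Dict.getD_empty, pvCount_eq_length x k]

-- ===== VERDICT (by name: the statement is the Claim_ definition above) =====
theorem validate_overlap_conditions_spec : Claim_equal_validate_overlap_conditions := by
  intro axr vb _
  show validate_overlap_conditions axr vb = validate_overlap_conditions_alt axr vb
  show axr.foldl (fun acc x => acc ++
      [(x.foldl pvStepA PySem.Dict.empty).items.foldl
        (fun vs q => if (q.2.count false : Int) ≤ pvAllowed vb then vs ++ [q.1] else vs) []]) []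
    = axr.map (fun x =>
        (x.foldl pvSeen []).filter (fun sid =>
          ((x.filter (fun p => p.1 == sid && p.2.1 == false)).length : Int) ≤ pvAllowed vb))
  rw [PySem.List.foldl_append_singleton_eq_map]
  simp only [List.nil_append]
  exact List.map_congr_left (fun x _ => pvPerSublist x (pvAllowed vb))
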